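-- pv_equiv track=rewrite | github.com/Spookiel/British-Informatics-Olympiad-Solutions | Code/2021/Q1/q1b.py | isPat
-- ===== SOURCE A (Python) =====
-- def isPat(a):
--     if len(a)==1:
--         return True
--     for x in range(1, len(a)):
--         l, r = a[:x], a[x:]
--         if all(i>j for i in l for j in r):
--             if isPat(l[::-1]) and isPat(r[::-1]):
--                 return True
--     return False
-- ===== SOURCE B (Python) =====
-- def _prefix_scan(a, f):
--     out = []
--     cur = None
--     for v in a:
--         cur = v if cur is None else f(cur, v)
--         out.append(cur)
--     return out
--
-- def isPat(a):
--     n = len(a)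
--     if n == 1:
--         return True
--     if n == 0:
--         return False
--     pmin = _prefix_scan(a, min)
--     smax = _prefix_scan(a[::-1], max)[::-1]
--     for x in range(1, n):
--         if pmin[x - 1] > smax[x]:
--             if isPat(a[:x][::-1]) and isPat(a[x:][::-1]):
--                 return True
--     return False
-- ===== Notes on version B (the rewrite author's own statement) =====
-- stated objective: faster
-- what changed: The all-pairs left-vs-right dominance test at each split is replaced by a one-time prefix-minimum and suffix-maximum scan, so each split is tested in O(1) via min(left) > max(right) instead of O(|left|*|right|).
import Mathlib
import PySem

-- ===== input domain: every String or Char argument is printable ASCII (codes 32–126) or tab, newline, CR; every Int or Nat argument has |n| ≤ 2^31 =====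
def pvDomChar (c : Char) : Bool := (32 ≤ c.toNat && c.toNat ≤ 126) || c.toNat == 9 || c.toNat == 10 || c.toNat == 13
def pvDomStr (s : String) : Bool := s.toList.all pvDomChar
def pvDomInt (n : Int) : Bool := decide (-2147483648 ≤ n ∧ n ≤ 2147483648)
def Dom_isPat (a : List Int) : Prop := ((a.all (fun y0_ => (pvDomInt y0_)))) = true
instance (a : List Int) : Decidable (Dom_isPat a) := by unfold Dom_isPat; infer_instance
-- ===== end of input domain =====

-- B replaces A's all-pairs left>right split test with prefix-min / suffix-max scans (asymptotically faster per call); equivalence is exact and total.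


-- ===== PORT A =====
-- Fuel = a.length makes the recursion structural; every recursive call is on a
-- strictly shorter list, so the fuel never runs out (at fuel 0 the list is empty
-- and Python's loop body is empty, returning False).
-- l[::-1] is ported as List.reverse (PySem.List.slice?_none_none_neg_one).
def isPatF : Nat → List Int → Bool
  | 0, _ => false
  | fuel+1, a =>
    if a.length == 1 then true
    else
      (PySem.List.pyRange 1 (a.length : Int) 1).any (fun x =>
        let l := PySem.List.slice a none (some x)
        let r := PySem.List.slice a (some x) none
        (l.all fun i => r.all fun j => decide (j < i)) &&
        (isPatF fuel l.reverse && isPatF fuel r.reverse))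

def isPat (a : List Int) : Bool := isPatF a.length a

-- ===== PORT B =====
-- _prefix_scan(a, f): running fold values, carrying the current value as an Option.
def prefScan (f : Int → Int → Int) : Option Int → List Int → List Int
  | _, [] => []
  | none, v :: t => v :: prefScan f (some v) t
  | some c, v :: t => f c v :: prefScan f (some (f c v)) t

-- Same fuel device as for A's port.  Slices with the nonnegative index x are
-- ported as take/drop (PySem.List.slice_to_natCast / slice_from_natCast),
-- [::-1] as List.reverse.
def isPatAltF : Nat → List Int → Bool
  | 0, _ => false
  | fuel+1, a =>
    let n := a.length
    if n == 1 then true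
    else if n == 0 then false
    else
      let pmin := prefScan min none a
      let smax := (prefScan max none a.reverse).reverse
      (List.range' 1 (n-1)).any (fun x =>
        decide (smax.getD x 0 < pmin.getD (x-1) 0) &&
        (isPatAltF fuel (a.take x).reverse && isPatAltF fuel (a.drop x).reverse))

def isPat_alt (a : List Int) : Bool := isPatAltF a.length a

-- ===== PRECONDITION & SPEC =====
def Spec_isPat (a : List Int) (out : Bool) : Prop := out = isPat_alt a
instance (a : List Int) (out : Bool) : Decidable (Spec_isPat a out) := by unfold Spec_isPat; infer_instance

-- ===== CLAIM (what is proved, stated in full; the proofs are below) =====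
def Claim_equal_isPat : Prop := ∀ (a : List Int), Dom_isPat a → Spec_isPat a (isPat a)

-- ===== LEMMAS AND PROOFS =====

theorem prefScan_length (f : Int → Int → Int) (c? : Option Int) (a : List Int) :
    (prefScan f c? a).length = a.length := by
  induction a generalizing c? with
  | nil => cases c? <;> rfl
  | cons v t ih => cases c? <;> simp [prefScan, ih]

theorem prefScan_some (f : Int → Int → Int)
    (hf : ∀ x y z : Int, f (f x y) z = f x (f y z)) (c : Int) (a : List Int) :
    prefScan f (some c) a = (prefScan f none a).map (f c) := by
  induction a generalizing c with
  | nil => rfl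
  | cons v t ih =>
    simp only [prefScan, List.map_cons]
    congr 1
    rw [ih (f c v), ih v, List.map_map]
    apply List.map_congr_left
    intro w _
    simp [Function.comp, hf]

theorem prefScan_min_spec (a : List Int) (i : Nat) (h : i < a.length) :
    (prefScan min none a).getD i 0 ∈ a.take (i+1) ∧
      ∀ v ∈ a.take (i+1), (prefScan min none a).getD i 0 ≤ v := by
  induction a generalizing i with
  | nil => simp at h
  | cons v t ih =>
    rw [show prefScan min none (v :: t) = v :: (prefScan min none t).map (min v) from by
      simp [prefScan, prefScan_some min (fun x y z => min_assoc x y z) v t]]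
    cases i with
    | zero => simp
    | succ j =>
      simp only [List.length_cons, Nat.succ_lt_succ_iff] at h
      have hlen : j < (prefScan min none t).length := by rw [prefScan_length]; exact h
      have hmap : ((prefScan min none t).map (min v)).getD j 0
          = min v ((prefScan min none t).getD j 0) := by
        rw [List.getD_eq_getElem _ _ (by simpa using hlen),
            List.getD_eq_getElem _ _ hlen, List.getElem_map]
      obtain ⟨hmem, hle⟩ := ih j h
      constructor
      · simp only [List.getD_cons_succ, hmap, List.take_succ_cons, List.mem_cons]
        rcases le_total v ((prefScan min none t).getD j 0) with hc | hc
        · exact Or.inl (min_eq_left hc)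
        · exact Or.inr (by rw [min_eq_right hc]; exact hmem)
      · intro w hw
        simp only [List.take_succ_cons, List.mem_cons] at hw
        simp only [List.getD_cons_succ, hmap]
        rcases hw with rfl | hw
        · exact min_le_left _ _
        · exact le_trans (min_le_right _ _) (hle w hw)

theorem prefScan_max_spec (a : List Int) (i : Nat) (h : i < a.length) :
    (prefScan max none a).getD i 0 ∈ a.take (i+1) ∧
      ∀ v ∈ a.take (i+1), v ≤ (prefScan max none a).getD i 0 := by
  induction a generalizing i with
  | nil => simp at h
  | cons v t ih =>
    rw [show prefScan max none (v :: t) = v :: (prefScan max none t).map (max v) from by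
      simp [prefScan, prefScan_some max (fun x y z => max_assoc x y z) v t]]
    cases i with
    | zero => simp
    | succ j =>
      simp only [List.length_cons, Nat.succ_lt_succ_iff] at h
      have hlen : j < (prefScan max none t).length := by rw [prefScan_length]; exact h
      have hmap : ((prefScan max none t).map (max v)).getD j 0
          = max v ((prefScan max none t).getD j 0) := by
        rw [List.getD_eq_getElem _ _ (by simpa using hlen),
            List.getD_eq_getElem _ _ hlen, List.getElem_map]
      obtain ⟨hmem, hle⟩ := ih j h
      constructor
      · simp only [List.getD_cons_succ, hmap, List.take_succ_cons, List.mem_cons]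
        rcases le_total ((prefScan max none t).getD j 0) v with hc | hc
        · exact Or.inl (max_eq_left hc)
        · exact Or.inr (by rw [max_eq_right hc]; exact hmem)
      · intro w hw
        simp only [List.take_succ_cons, List.mem_cons] at hw
        simp only [List.getD_cons_succ, hmap]
        rcases hw with rfl | hw
        · exact le_max_left _ _
        · exact le_trans (hle w hw) (le_max_right _ _)

-- the split condition: all-pairs left>right equals min(left) > max(right)
theorem cond_eq (a : List Int) (t : Nat) (ht1 : 1 ≤ t) (ht2 : t < a.length) :
    ((a.take t).all fun i => (a.drop t).all fun j => decide (j < i))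
      = decide (((prefScan max none a.reverse).reverse).getD t 0
          < (prefScan min none a).getD (t-1) 0) := by
  obtain ⟨hpmem, hple⟩ := prefScan_min_spec a (t-1) (by omega)
  rw [show (t-1)+1 = t from by omega] at hpmem hple
  have hlenr : (prefScan max none a.reverse).length = a.length := by
    rw [prefScan_length, List.length_reverse]
  have hrev : ((prefScan max none a.reverse).reverse).getD t 0
      = (prefScan max none a.reverse).getD (a.length - 1 - t) 0 := by
    rw [List.getD_eq_getElem _ _ (by simp [hlenr]; omega),
        List.getD_eq_getElem _ _ (by omega : a.length - 1 - t < (prefScan max none a.reverse).length),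
        List.getElem_reverse]
    congr 1
    omega
  obtain ⟨hsmem, hsle⟩ := prefScan_max_spec a.reverse (a.length - 1 - t)
    (by rw [List.length_reverse]; omega)
  have htake : a.reverse.take ((a.length - 1 - t) + 1) = (a.drop t).reverse := by
    rw [show (a.length - 1 - t) + 1 = a.length - t from by omega, List.take_reverse,
        show a.length - (a.length - t) = t from by omega]
  rw [htake, List.mem_reverse] at hsmem
  have hsle' : ∀ v ∈ a.drop t, v ≤ (prefScan max none a.reverse).getD (a.length - 1 - t) 0 := by
    intro v hv
    exact hsle v (by rw [htake, List.mem_reverse]; exact hv)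
  rw [hrev, Bool.eq_iff_iff]
  simp only [List.all_eq_true, decide_eq_true_eq]
  constructor
  · intro h
    exact h _ hpmem _ hsmem
  · intro h i hi j hj
    exact lt_of_le_of_lt (hsle' j hj) (lt_of_lt_of_le h (hple i hi))

theorem any_congr_mem {α : Type} (l : List α) (p q : α → Bool)
    (h : ∀ x ∈ l, p x = q x) : l.any p = l.any q := by
  induction l with
  | nil => rfl
  | cons x t ih =>
    simp only [List.any_cons, h x (by simp), ih (fun y hy => h y (by simp [hy]))]

theorem main_fuel (fuel : Nat) : ∀ a : List Int, isPatF fuel a = isPatAltF fuel a := by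
  induction fuel with
  | zero => intro a; rfl
  | succ fuel ih =>
    intro a
    by_cases h1 : a.length = 1
    · simp [isPatF, isPatAltF, h1]
    by_cases h0 : a.length = 0
    · obtain rfl : a = [] := List.length_eq_zero_iff.mp h0
      simp [isPatF, isPatAltF, PySem.List.pyRange_one_eq_nil]
    -- main case: a.length ≥ 2
    have h2 : 2 ≤ a.length := by omega
    simp only [isPatF, isPatAltF, beq_iff_eq, h1, h0, if_false]
    rw [PySem.List.pyRange_one, List.range'_eq_map_range, List.any_map, List.any_map]
    have hcast : ((a.length : Int) - 1).toNat = a.length - 1 := by omega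
    rw [hcast]
    apply any_congr_mem
    intro k hk
    have hk' : k < a.length - 1 := List.mem_range.mp hk
    simp only [Function.comp]
    have hx : (1 : Int) + (k : Int) = ((k + 1 : Nat) : Int) := by push_cast; ring
    have hsl : PySem.List.slice a none (some ((1:Int) + k)) = a.take (k+1) := by
      rw [hx, PySem.List.slice_to_natCast]
    have hsr : PySem.List.slice a (some ((1:Int) + k)) none = a.drop (k+1) := by
      rw [hx, PySem.List.slice_from_natCast]
    simp only [hsl, hsr]
    rw [ih ((a.take (k+1)).reverse), ih ((a.drop (k+1)).reverse),
        cond_eq a (k+1) (by omega) (by omega)]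
    simp [Nat.add_comm 1 k]

-- ===== VERDICT (by name: the statement is the Claim_ definition above) =====
theorem isPat_spec : Claim_equal_isPat := by
  intro a _
  unfold Spec_isPat isPat isPat_alt
  exact main_fuel a.length a
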